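-- pv_equiv track=rewrite | github.com/karvendhanm/DSA | same_bsts_v2.py | sameBstsHelper
-- ===== SOURCE A (Python) =====
-- def sameBstsHelper(arrayOne, arrayTwo, rootIdxArrayOne, rootIdxArrayTwo, minVal, maxVal):
--     if rootIdxArrayOne == -1 or rootIdxArrayTwo == -1:
--         return rootIdxArrayOne == rootIdxArrayTwo
--
--     if arrayOne[rootIdxArrayOne] != arrayTwo[rootIdxArrayTwo]:
--         return False
--
--     currentValue = arrayOne[rootIdxArrayOne]
--     leftBSTRootIdxArrayOne = getSmallerValIdxFromRootIdx(arrayOne, rootIdxArrayOne, minVal, maxVal)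
--     leftBSTRootIdxArrayTwo = getSmallerValIdxFromRootIdx(arrayTwo, rootIdxArrayTwo, minVal, maxVal)
--     rightBSTRootIdxArrayOne = getBiggerOrEqualValIdxFromRootIdx(arrayOne, rootIdxArrayOne, minVal, maxVal)
--     rightBSTRootIdxArrayTwo = getBiggerOrEqualValIdxFromRootIdx(arrayTwo, rootIdxArrayTwo, minVal, maxVal)
--
--     leftBSTsSame = sameBstsHelper(arrayOne, arrayTwo, leftBSTRootIdxArrayOne, leftBSTRootIdxArrayTwo, minVal, currentValue)
--     rightBSTsSame = sameBstsHelper(arrayOne, arrayTwo, rightBSTRootIdxArrayOne, rightBSTRootIdxArrayTwo, currentValue, maxVal)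
--
--     return leftBSTsSame and rightBSTsSame
--
-- def getSmallerValIdxFromRootIdx(array, rootIdx, minVal, maxVal):
--     for i in range(rootIdx + 1, len(array)):
--         if array[i] < array[rootIdx] and array[i] >= minVal:
--             return i
--     return -1
--
-- def getBiggerOrEqualValIdxFromRootIdx(array, rootIdx, minVal, maxVal):
--     for i in range(rootIdx + 1, len(array)):
--         if array[i] >= array[rootIdx] and array[i] < maxVal:
--             return i
--     return -1
-- ===== SOURCE B (Python) =====
-- def sameBstsHelper(arrayOne, arrayTwo, rootIdxArrayOne, rootIdxArrayTwo, minVal, maxVal):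
--     # Build each implied BST once as an explicit structure, then compare them.
--     return (_treeOf(arrayOne, rootIdxArrayOne, minVal, maxVal)
--             == _treeOf(arrayTwo, rootIdxArrayTwo, minVal, maxVal))
--
-- def _treeOf(array, rootIdx, minVal, maxVal):
--     if rootIdx == -1:
--         return None
--     return _build(array[rootIdx:], minVal, maxVal)
--
-- def _build(suffix, minVal, maxVal):
--     # suffix[0] is the root value; children live somewhere in suffix[1:]
--     v = suffix[0]
--     rest = suffix[1:]
--     leftSuffix = _childSuffix(rest, minVal, v)
--     rightSuffix = _childSuffix(rest, v, maxVal)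
--     left = None if leftSuffix is None else _build(leftSuffix, minVal, v)
--     right = None if rightSuffix is None else _build(rightSuffix, v, maxVal)
--     return (v, left, right)
--
-- def _childSuffix(rest, lo, hi):
--     # suffix of rest starting at its first element in [lo, hi), or None
--     for k, x in enumerate(rest):
--         if lo <= x < hi:
--             return rest[k:]
--     return None
-- ===== Notes on version B (the rewrite author's own statement) =====
-- stated objective: alternative
-- what changed: A's lockstep twin recursion over index pairs with min/max bounds is replaced by building each array's implied BST once as an explicit tree structure (recursing on list suffixes, no indices) and comparing the two trees for equality.
-- outside the precondition, e.g. on sameBstsHelper([1, 2], [1, 2], -2, 0, 0, 5): A returns False, B returns True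
import Mathlib
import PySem

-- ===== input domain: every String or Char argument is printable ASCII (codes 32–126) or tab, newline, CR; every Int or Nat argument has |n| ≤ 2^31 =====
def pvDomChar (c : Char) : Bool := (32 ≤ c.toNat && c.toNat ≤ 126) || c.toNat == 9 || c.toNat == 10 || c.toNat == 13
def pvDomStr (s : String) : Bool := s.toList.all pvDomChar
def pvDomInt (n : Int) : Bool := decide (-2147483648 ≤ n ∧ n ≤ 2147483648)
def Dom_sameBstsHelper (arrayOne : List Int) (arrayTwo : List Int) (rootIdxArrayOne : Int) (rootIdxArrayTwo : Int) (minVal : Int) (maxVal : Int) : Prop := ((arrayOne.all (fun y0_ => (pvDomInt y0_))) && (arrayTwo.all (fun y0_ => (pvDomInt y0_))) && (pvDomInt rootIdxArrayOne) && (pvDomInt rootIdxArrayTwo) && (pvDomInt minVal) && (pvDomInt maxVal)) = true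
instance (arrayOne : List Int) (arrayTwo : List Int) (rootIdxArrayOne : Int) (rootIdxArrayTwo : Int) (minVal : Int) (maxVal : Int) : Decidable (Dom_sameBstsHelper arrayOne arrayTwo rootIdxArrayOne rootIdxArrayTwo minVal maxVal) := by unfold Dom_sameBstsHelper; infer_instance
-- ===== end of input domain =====

-- B replaces A's lockstep twin recursion by building each array's implied BST once as an
-- explicit tree structure and comparing the two trees (objective: alternative decomposition).

-- ===== PORT A =====

-- the for-loop body shared by both index searches: scan the indices i = rootIdx+1 … len-1,
-- return the first i whose element satisfies p, else -1 (none from pyGet? = IndexError, outside Pre_)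
def scanIdxFrom (array : List Int) (p : Int → Bool) : List Int → Int
  | [] => -1
  | i :: rest =>
    match PySem.List.pyGet? array i with
    | some x => if p x then i else scanIdxFrom array p rest
    | none => -1

def getSmallerValIdxFromRootIdx (array : List Int) (rootIdx minVal _maxVal : Int) : Int :=
  match PySem.List.pyGet? array rootIdx with
  | none => -1  -- array[rootIdx] raises IndexError in Python (outside Pre_)
  | some rv => scanIdxFrom array (fun x => x < rv && minVal ≤ x)
      (PySem.List.pyRange (rootIdx + 1) array.length 1)

def getBiggerOrEqualValIdxFromRootIdx (array : List Int) (rootIdx _minVal maxVal : Int) : Int :=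
  match PySem.List.pyGet? array rootIdx with
  | none => -1  -- array[rootIdx] raises IndexError in Python (outside Pre_)
  | some rv => scanIdxFrom array (fun x => rv ≤ x && x < maxVal)
      (PySem.List.pyRange (rootIdx + 1) array.length 1)

-- fuel is only a totality device: inside Pre_ the non-base indices strictly increase in each
-- array, so the seeded fuel (length + length + 2) never runs out
def sameBstsHelperFuel (a1 a2 : List Int) : Nat → Int → Int → Int → Int → Bool
  | 0, _, _, _, _ => false
  | fuel + 1, r1, r2, mn, mx =>
    if r1 = -1 ∨ r2 = -1 then decide (r1 = r2)
    else
      match PySem.List.pyGet? a1 r1, PySem.List.pyGet? a2 r2 with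
      | some v1, some v2 =>
        if v1 ≠ v2 then false
        else
          let cur := v1
          let l1 := getSmallerValIdxFromRootIdx a1 r1 mn mx
          let l2 := getSmallerValIdxFromRootIdx a2 r2 mn mx
          let g1 := getBiggerOrEqualValIdxFromRootIdx a1 r1 mn mx
          let g2 := getBiggerOrEqualValIdxFromRootIdx a2 r2 mn mx
          sameBstsHelperFuel a1 a2 fuel l1 l2 mn cur &&
          sameBstsHelperFuel a1 a2 fuel g1 g2 cur mx
      | _, _ => false  -- IndexError (outside Pre_)

def sameBstsHelper (arrayOne : List Int) (arrayTwo : List Int) (rootIdxArrayOne : Int) (rootIdxArrayTwo : Int) (minVal : Int) (maxVal : Int) : Bool :=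
  sameBstsHelperFuel arrayOne arrayTwo (arrayOne.length + arrayTwo.length + 2)
    rootIdxArrayOne rootIdxArrayTwo minVal maxVal

-- ===== PORT B =====

inductive BTree where
  | leaf : BTree
  | node : Int → BTree → BTree → BTree
deriving DecidableEq

-- _childSuffix: suffix of rest starting at its first element in [lo, hi), or None
def childSuffix (lo hi : Int) : List Int → Option (List Int)
  | [] => none
  | x :: xs => if lo ≤ x && x < hi then some (x :: xs) else childSuffix lo hi xs

theorem childSuffix_length_le (lo hi : Int) :
    ∀ xs ys : List Int, childSuffix lo hi xs = some ys → ys.length ≤ xs.length := by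
  intro xs
  induction xs with
  | nil => intro ys h; simp [childSuffix] at h
  | cons x xs ih =>
    intro ys h
    simp only [childSuffix] at h
    split at h
    · cases h; exact le_refl _
    · exact Nat.le_succ_of_le (ih ys h)

-- _build: the [] case is unreachable in Python B (suffix nonempty there; Python raises on [])
def buildB : List Int → Int → Int → BTree
  | [], _, _ => .leaf
  | v :: rest, mn, mx =>
    let l := match h : childSuffix mn v rest with
             | none => BTree.leaf
             | some ys => buildB ys mn v
    let r := match h : childSuffix v mx rest with
             | none => BTree.leaf
             | some ys => buildB ys v mx
    .node v l r
termination_by s _ _ => s.length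
decreasing_by
  · exact Nat.lt_succ_of_le (childSuffix_length_le _ _ _ _ h)
  · exact Nat.lt_succ_of_le (childSuffix_length_le _ _ _ _ h)

-- _treeOf: array[rootIdx:] is PySem slice
def treeOf (array : List Int) (rootIdx minVal maxVal : Int) : BTree :=
  if rootIdx = -1 then .leaf
  else buildB (PySem.List.slice array (some rootIdx) none) minVal maxVal

def sameBstsHelper_alt (arrayOne : List Int) (arrayTwo : List Int) (rootIdxArrayOne : Int) (rootIdxArrayTwo : Int) (minVal : Int) (maxVal : Int) : Bool :=
  decide (treeOf arrayOne rootIdxArrayOne minVal maxVal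
        = treeOf arrayTwo rootIdxArrayTwo minVal maxVal)

-- ===== PRECONDITION & SPEC =====
-- Pre_ restricts the root indices to the natural domain: -1 (empty subtree) or a valid
-- nonnegative position. Outside it A raises IndexError (index ≥ len or < -len), and for the
-- remaining negative indices A's value is an artefact of Python's negative-index wraparound
-- (range(rootIdx+1, len) plus wrapped lookups) which B does not reproduce.
def Pre_sameBstsHelper (arrayOne : List Int) (arrayTwo : List Int) (rootIdxArrayOne : Int) (rootIdxArrayTwo : Int) (minVal : Int) (maxVal : Int) : Prop :=
  (rootIdxArrayOne = -1 ∨ (0 ≤ rootIdxArrayOne ∧ rootIdxArrayOne < arrayOne.length)) ∧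
  (rootIdxArrayTwo = -1 ∨ (0 ≤ rootIdxArrayTwo ∧ rootIdxArrayTwo < arrayTwo.length))
instance (arrayOne : List Int) (arrayTwo : List Int) (rootIdxArrayOne : Int) (rootIdxArrayTwo : Int) (minVal : Int) (maxVal : Int) : Decidable (Pre_sameBstsHelper arrayOne arrayTwo rootIdxArrayOne rootIdxArrayTwo minVal maxVal) := by unfold Pre_sameBstsHelper; infer_instance

def pvWitness_sameBstsHelper : List Int × List Int × Int × Int × Int × Int :=
  ([2, 1, 3], [2, 3, 1], 0, 0, -10, 10)

def Spec_sameBstsHelper (arrayOne : List Int) (arrayTwo : List Int) (rootIdxArrayOne : Int) (rootIdxArrayTwo : Int) (minVal : Int) (maxVal : Int) (out : Bool) : Prop := out = sameBstsHelper_alt arrayOne arrayTwo rootIdxArrayOne rootIdxArrayTwo minVal maxVal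
instance (arrayOne : List Int) (arrayTwo : List Int) (rootIdxArrayOne : Int) (rootIdxArrayTwo : Int) (minVal : Int) (maxVal : Int) (out : Bool) : Decidable (Spec_sameBstsHelper arrayOne arrayTwo rootIdxArrayOne rootIdxArrayTwo minVal maxVal out) := by unfold Spec_sameBstsHelper; infer_instance

-- ===== CLAIM (what is proved, stated in full; the proofs are below) =====
def Claim_equal_sameBstsHelper : Prop := ∀ (arrayOne : List Int) (arrayTwo : List Int) (rootIdxArrayOne : Int) (rootIdxArrayTwo : Int) (minVal : Int) (maxVal : Int), Dom_sameBstsHelper arrayOne arrayTwo rootIdxArrayOne rootIdxArrayTwo minVal maxVal → Pre_sameBstsHelper arrayOne arrayTwo rootIdxArrayOne rootIdxArrayTwo minVal maxVal → Spec_sameBstsHelper arrayOne arrayTwo rootIdxArrayOne rootIdxArrayTwo minVal maxVal (sameBstsHelper arrayOne arrayTwo rootIdxArrayOne rootIdxArrayTwo minVal maxVal)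

-- ===== LEMMAS AND PROOFS =====

theorem scan_child_eq (a : List Int) (p : Int → Bool) (lo hi : Int)
    (hp : ∀ x, p x = (decide (lo ≤ x) && decide (x < hi))) :
    ∀ k : Nat, k ≤ a.length →
      (scanIdxFrom a p (PySem.List.pyRange (k : Int) a.length 1) = -1 ∧
        childSuffix lo hi (a.drop k) = none)
      ∨ (∃ j : Nat, k ≤ j ∧ j < a.length ∧
          scanIdxFrom a p (PySem.List.pyRange (k : Int) a.length 1) = (j : Int) ∧
          childSuffix lo hi (a.drop k) = some (a.drop j)) := by
  have main : ∀ (m k : Nat), a.length - k = m → k ≤ a.length →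
      (scanIdxFrom a p (PySem.List.pyRange (k : Int) a.length 1) = -1 ∧
        childSuffix lo hi (a.drop k) = none)
      ∨ (∃ j : Nat, k ≤ j ∧ j < a.length ∧
          scanIdxFrom a p (PySem.List.pyRange (k : Int) a.length 1) = (j : Int) ∧
          childSuffix lo hi (a.drop k) = some (a.drop j)) := by
    intro m
    induction m with
    | zero =>
      intro k hm hk
      have hk' : k = a.length := by omega
      subst hk'
      left
      constructor
      · have h0 : PySem.List.pyRange (a.length : Int) a.length 1 = [] := by
          simp
        rw [h0]; rfl
      · rw [List.drop_length]; rfl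
    | succ m ih =>
      intro k hm hk
      have hklt : k < a.length := by omega
      have hcons : PySem.List.pyRange (k : Int) a.length 1
          = (k : Int) :: PySem.List.pyRange ((k : Int) + 1) a.length 1 :=
        PySem.List.pyRange_one_cons (by exact_mod_cast hklt)
      have hdrop : a.drop k = a[k] :: a.drop (k + 1) := List.drop_eq_getElem_cons hklt
      have hget : PySem.List.pyGet? a (k : Int) = some a[k] := by
        simp [PySem.List.pyGet?_natCast, List.getElem?_eq_getElem hklt]
      rw [hcons, hdrop]
      simp only [scanIdxFrom, hget, childSuffix]
      by_cases hpk : p a[k] = true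
      · rw [if_pos hpk]
        have hcond : (decide (lo ≤ a[k]) && decide (a[k] < hi)) = true := by
          rw [← hp]; exact hpk
        right
        refine ⟨k, le_refl _, hklt, rfl, ?_⟩
        rw [if_pos hcond, ← hdrop]
      · rw [if_neg hpk]
        have hcond : ¬ ((decide (lo ≤ a[k]) && decide (a[k] < hi)) = true) := by
          rw [← hp]; exact hpk
        rw [if_neg hcond]
        have hcast : ((k : Int) + 1) = ((k + 1 : Nat) : Int) := by push_cast; ring
        rw [hcast]
        rcases ih (k + 1) (by omega) (by omega) with ⟨h1, h2⟩ | ⟨j, hj1, hj2, hj3, hj4⟩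
        · left; exact ⟨h1, h2⟩
        · right; exact ⟨j, by omega, hj2, hj3, hj4⟩
  exact fun k => main (a.length - k) k rfl

theorem treeOf_nonneg (a : List Int) (r mn mx : Int) (h0 : 0 ≤ r) :
    treeOf a r mn mx = buildB (a.drop r.toNat) mn mx := by
  unfold treeOf
  rw [if_neg (by omega)]
  exact congrArg (fun s => buildB s mn mx) (PySem.List.slice_from a h0)

theorem buildB_cons (v : Int) (rest : List Int) (mn mx : Int) (o1 o2 : Option (List Int))
    (h1 : childSuffix mn v rest = o1) (h2 : childSuffix v mx rest = o2) :
    buildB (v :: rest) mn mx = BTree.node v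
      (o1.elim BTree.leaf (fun ys => buildB ys mn v))
      (o2.elim BTree.leaf (fun ys => buildB ys v mx)) := by
  rw [buildB]
  congr 1
  · split <;> rename_i heq <;> rw [heq] at h1 <;> rw [← h1] <;> rfl
  · split <;> rename_i heq <;> rw [heq] at h2 <;> rw [← h2] <;> rfl

theorem treeOf_valid_node (a : List Int) (r mn mx : Int) (h0 : 0 ≤ r) (hl : r < a.length) :
    ∃ v l t, treeOf a r mn mx = BTree.node v l t := by
  rw [treeOf_nonneg a r mn mx h0]
  have hlt : r.toNat < a.length := by omega
  rw [List.drop_eq_getElem_cons hlt, buildB_cons _ _ _ _ _ _ rfl rfl]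
  exact ⟨_, _, _, rfl⟩

theorem getSmaller_child (a : List Int) (r mn mx v : Int) (h0 : 0 ≤ r)
    (hv : PySem.List.pyGet? a r = some v) :
    (getSmallerValIdxFromRootIdx a r mn mx = -1 ∧
      childSuffix mn v (a.drop (r.toNat + 1)) = none)
    ∨ (∃ j : Nat, r.toNat + 1 ≤ j ∧ j < a.length ∧
        getSmallerValIdxFromRootIdx a r mn mx = (j : Int) ∧
        childSuffix mn v (a.drop (r.toNat + 1)) = some (a.drop j)) := by
  unfold getSmallerValIdxFromRootIdx
  rw [hv]
  have hcast : r + 1 = ((r.toNat + 1 : Nat) : Int) := by omega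
  rw [hcast]
  by_cases hle : r.toNat + 1 ≤ a.length
  · exact scan_child_eq a _ mn v (fun x => Bool.and_comm _ _) (r.toNat + 1) hle
  · left
    constructor
    · have h0' : PySem.List.pyRange ((r.toNat + 1 : Nat) : Int) a.length 1 = [] := by
        rw [PySem.List.pyRange_one]
        have : ((a.length : Int) - ((r.toNat + 1 : Nat) : Int)).toNat = 0 := by omega
        rw [this]; rfl
      rw [h0']; rfl
    · rw [List.drop_eq_nil_of_le (by omega)]; rfl

theorem getBigger_child (a : List Int) (r mn mx v : Int) (h0 : 0 ≤ r)
    (hv : PySem.List.pyGet? a r = some v) :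
    (getBiggerOrEqualValIdxFromRootIdx a r mn mx = -1 ∧
      childSuffix v mx (a.drop (r.toNat + 1)) = none)
    ∨ (∃ j : Nat, r.toNat + 1 ≤ j ∧ j < a.length ∧
        getBiggerOrEqualValIdxFromRootIdx a r mn mx = (j : Int) ∧
        childSuffix v mx (a.drop (r.toNat + 1)) = some (a.drop j)) := by
  unfold getBiggerOrEqualValIdxFromRootIdx
  rw [hv]
  have hcast : r + 1 = ((r.toNat + 1 : Nat) : Int) := by omega
  rw [hcast]
  by_cases hle : r.toNat + 1 ≤ a.length
  · exact scan_child_eq a _ v mx (fun x => rfl) (r.toNat + 1) hle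
  · left
    constructor
    · have h0' : PySem.List.pyRange ((r.toNat + 1 : Nat) : Int) a.length 1 = [] := by
        rw [PySem.List.pyRange_one]
        have : ((a.length : Int) - ((r.toNat + 1 : Nat) : Int)).toNat = 0 := by omega
        rw [this]; rfl
      rw [h0']; rfl
    · rw [List.drop_eq_nil_of_le (by omega)]; rfl

-- turns a search disjunction into: the matched child branch of buildB IS treeOf at the
-- child index, plus validity and progress facts about the child index
theorem child_branch (a : List Int) (r lo hi : Int) (c : Int)
    (hD : (c = -1 ∧ childSuffix lo hi (a.drop (r.toNat + 1)) = none)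
        ∨ (∃ j : Nat, r.toNat + 1 ≤ j ∧ j < a.length ∧ c = (j : Int) ∧
            childSuffix lo hi (a.drop (r.toNat + 1)) = some (a.drop j))) :
    (childSuffix lo hi (a.drop (r.toNat + 1))).elim BTree.leaf
      (fun ys => buildB ys lo hi) = treeOf a c lo hi
    ∧ (c = -1 ∨ (0 ≤ c ∧ c < a.length))
    ∧ (0 ≤ c → r.toNat + 1 ≤ c.toNat ∧ c.toNat < a.length) := by
  rcases hD with ⟨hc, hnone⟩ | ⟨j, hj1, hj2, hc, hsome⟩
  · subst hc
    rw [hnone]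
    refine ⟨by simp [treeOf], Or.inl rfl, by intro h; omega⟩
  · subst hc
    rw [hsome]
    refine ⟨?_, Or.inr ⟨by omega, by exact_mod_cast hj2⟩, by intro _; simp; omega⟩
    rw [treeOf_nonneg a j lo hi (by omega)]
    simp

theorem decide_node_eq (v1 v2 : Int) (l1 t1 l2 t2 : BTree) :
    (decide (BTree.node v1 l1 t1 = BTree.node v2 l2 t2))
      = (decide (v1 = v2) && decide (l1 = l2) && decide (t1 = t2)) := by
  simp [BTree.node.injEq, Bool.and_assoc]

theorem mainFuel : ∀ (fuel : Nat) (a1 a2 : List Int) (r1 r2 mn mx : Int),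
    (r1 = -1 ∨ (0 ≤ r1 ∧ r1 < a1.length)) →
    (r2 = -1 ∨ (0 ≤ r2 ∧ r2 < a2.length)) →
    1 ≤ fuel → (0 ≤ r1 → a1.length + 1 - r1.toNat ≤ fuel) →
    sameBstsHelperFuel a1 a2 fuel r1 r2 mn mx
      = decide (treeOf a1 r1 mn mx = treeOf a2 r2 mn mx) := by
  intro fuel
  induction fuel with
  | zero => intro a1 a2 r1 r2 mn mx _ _ hf _; omega
  | succ fuel ih =>
    intro a1 a2 r1 r2 mn mx hv1 hv2 _ hf2
    by_cases hbase : r1 = -1 ∨ r2 = -1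
    · rw [show sameBstsHelperFuel a1 a2 (fuel + 1) r1 r2 mn mx = decide (r1 = r2) from by
        simp only [sameBstsHelperFuel]; rw [if_pos hbase]]
      by_cases heq : r1 = r2
      · subst heq
        have h1 : r1 = -1 := by rcases hbase with h | h <;> exact h
        subst h1
        simp [treeOf]
      · rcases hbase with h1 | h2
        · subst h1
          rcases hv2 with h | ⟨h0, hl⟩
          · omega
          · obtain ⟨v, l, t, ht⟩ := treeOf_valid_node a2 r2 mn mx h0 hl
            have hleaf : treeOf a1 (-1) mn mx = BTree.leaf := by simp [treeOf]
            rw [hleaf, ht]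
            simp [heq]
        · subst h2
          rcases hv1 with h | ⟨h0, hl⟩
          · omega
          · obtain ⟨v, l, t, ht⟩ := treeOf_valid_node a1 r1 mn mx h0 hl
            have hleaf : treeOf a2 (-1) mn mx = BTree.leaf := by simp [treeOf]
            rw [hleaf, ht]
            simp [heq]
    · push_neg at hbase
      rcases hv1 with h | ⟨h01, hl1⟩; · exact absurd h hbase.1
      rcases hv2 with h | ⟨h02, hl2⟩; · exact absurd h hbase.2
      have hn1 : r1.toNat < a1.length := by omega
      have hn2 : r2.toNat < a2.length := by omega
      have hget1 : PySem.List.pyGet? a1 r1 = some a1[r1.toNat] :=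
        PySem.List.pyGet?_eq_some_getElem _ h01 hl1
      have hget2 : PySem.List.pyGet? a2 r2 = some a2[r2.toNat] :=
        PySem.List.pyGet?_eq_some_getElem _ h02 hl2
      have ht1 : treeOf a1 r1 mn mx = BTree.node a1[r1.toNat]
          ((childSuffix mn a1[r1.toNat] (a1.drop (r1.toNat + 1))).elim BTree.leaf
            (fun ys => buildB ys mn a1[r1.toNat]))
          ((childSuffix a1[r1.toNat] mx (a1.drop (r1.toNat + 1))).elim BTree.leaf
            (fun ys => buildB ys a1[r1.toNat] mx)) := by
        rw [treeOf_nonneg a1 r1 mn mx h01, List.drop_eq_getElem_cons hn1,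
          buildB_cons _ _ _ _ _ _ rfl rfl]
      have ht2 : treeOf a2 r2 mn mx = BTree.node a2[r2.toNat]
          ((childSuffix mn a2[r2.toNat] (a2.drop (r2.toNat + 1))).elim BTree.leaf
            (fun ys => buildB ys mn a2[r2.toNat]))
          ((childSuffix a2[r2.toNat] mx (a2.drop (r2.toNat + 1))).elim BTree.leaf
            (fun ys => buildB ys a2[r2.toNat] mx)) := by
        rw [treeOf_nonneg a2 r2 mn mx h02, List.drop_eq_getElem_cons hn2,
          buildB_cons _ _ _ _ _ _ rfl rfl]
      rw [show sameBstsHelperFuel a1 a2 (fuel + 1) r1 r2 mn mx =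
          (if a1[r1.toNat] ≠ a2[r2.toNat] then false
           else
             sameBstsHelperFuel a1 a2 fuel (getSmallerValIdxFromRootIdx a1 r1 mn mx)
               (getSmallerValIdxFromRootIdx a2 r2 mn mx) mn a1[r1.toNat] &&
             sameBstsHelperFuel a1 a2 fuel (getBiggerOrEqualValIdxFromRootIdx a1 r1 mn mx)
               (getBiggerOrEqualValIdxFromRootIdx a2 r2 mn mx) a1[r1.toNat] mx) from by
        simp only [sameBstsHelperFuel]
        rw [if_neg (by push_neg; exact hbase)]
        rw [hget1, hget2]]
      by_cases hvv : a1[r1.toNat] = a2[r2.toNat]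
      · rw [if_neg (by simpa using hvv)]
        obtain ⟨hL1, hval1, hprog1⟩ :=
          child_branch a1 r1 mn a1[r1.toNat] _ (getSmaller_child a1 r1 mn mx a1[r1.toNat] h01 hget1)
        obtain ⟨hL2, hval2, hprog2⟩ :=
          child_branch a2 r2 mn a2[r2.toNat] _ (getSmaller_child a2 r2 mn mx a2[r2.toNat] h02 hget2)
        obtain ⟨hR1, hval1', hprog1'⟩ :=
          child_branch a1 r1 a1[r1.toNat] mx _ (getBigger_child a1 r1 mn mx a1[r1.toNat] h01 hget1)
        obtain ⟨hR2, hval2', hprog2'⟩ :=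
          child_branch a2 r2 a2[r2.toNat] mx _ (getBigger_child a2 r2 mn mx a2[r2.toNat] h02 hget2)
        rw [ht1, ht2, hvv] at *
        rw [decide_node_eq]
        rw [hL1, hL2, hR1, hR2]
        have hfuel1 : 1 ≤ fuel := by
          have := hf2 h01; omega
        rw [ih a1 a2 _ _ mn a2[r2.toNat] hval1 hval2 hfuel1 (by
          intro hc
          have h1 := hprog1 hc
          have := hf2 h01
          omega)]
        rw [ih a1 a2 _ _ a2[r2.toNat] mx hval1' hval2' hfuel1 (by
          intro hc
          have h1 := hprog1' hc
          have := hf2 h01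
          omega)]
        simp
      · rw [if_pos (by simpa using hvv), ht1, ht2, decide_node_eq]
        simp [hvv]

-- ===== VERDICT (by name: the statement is the Claim_ definition above) =====
theorem sameBstsHelper_spec : Claim_equal_sameBstsHelper := by
  intro a1 a2 r1 r2 mn mx _ hpre
  unfold Spec_sameBstsHelper sameBstsHelper sameBstsHelper_alt
  exact mainFuel _ a1 a2 r1 r2 mn mx hpre.1 hpre.2 (by omega) (by intro h; omega)
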